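-- pv_equiv track=rewrite | github.com/LanTy7/model_c | scripts/download_negative_samples.py | extract_organism
-- ===== SOURCE A (Python) =====
-- def extract_organism(header: str) -> str:
--     """
--     Extract organism name from UniProt FASTA header.
--     UniProt format: >sp|accession|protein_name OS=Organism_name OX=...
--     """
--     # Look for OS= field (Organism Scientific name)
--     if 'OS=' in header:
--         # Extract text between OS= and the next OX= or GN= or PE= or SV=
--         start = header.find('OS=') + 3
--         end = len(header)
--         for marker in [' OX=', ' GN=', ' PE=', ' SV=']:
--             pos = header.find(marker, start)
--             if pos != -1 and pos < end:
--                 end = pos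
--         return header[start:end].strip()
--     return 'unknown'
-- ===== SOURCE B (Python) =====
-- def extract_organism(header: str) -> str:
--     i = header.find('OS=')
--     if i == -1:
--         return 'unknown'
--     rest = header[i + 3:]
--     name = []
--     for j, c in enumerate(rest):
--         if c == ' ' and rest[j + 1:j + 4] in ('OX=', 'GN=', 'PE=', 'SV='):
--             break
--         name.append(c)
--     return ''.join(name).strip()
-- ===== Notes on version B (the rewrite author's own statement) =====
-- stated objective: alternative
-- what changed: Replaces the four full-string find() passes plus running-minimum end index with a single left-to-right character scan over the text after OS= that stops at the first space-prefixed OX=/GN=/PE=/SV= marker.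
import Mathlib
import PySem

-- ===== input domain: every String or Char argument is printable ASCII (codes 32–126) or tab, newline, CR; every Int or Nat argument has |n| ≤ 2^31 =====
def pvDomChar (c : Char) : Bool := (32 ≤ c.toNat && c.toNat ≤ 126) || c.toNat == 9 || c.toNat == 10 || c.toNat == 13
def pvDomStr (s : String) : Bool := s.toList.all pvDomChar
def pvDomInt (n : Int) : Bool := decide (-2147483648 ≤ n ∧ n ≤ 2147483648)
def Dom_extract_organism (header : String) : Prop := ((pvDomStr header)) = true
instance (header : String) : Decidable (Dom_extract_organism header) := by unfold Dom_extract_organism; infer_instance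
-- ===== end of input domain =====

-- B replaces A's four full-string find() passes with a running-minimum end index by a single
-- left-to-right scan after OS= that stops at the first space-prefixed OX=/GN=/PE=/SV= marker
-- (objective: alternative single-pass formulation; same return value everywhere).

-- ===== PORT A =====
def extract_organism (header : String) : String :=
  if PySem.Str.isIn "OS=" header then
    let start : Int := PySem.Str.find header "OS=" + 3
    let stop : Int :=
      [" OX=", " GN=", " PE=", " SV="].foldl
        (fun e m =>
          let pos := PySem.Str.findFrom header m start
          if pos ≠ -1 ∧ pos < e then pos else e)
        (PySem.Str.len header)
    PySem.Str.strip (PySem.Str.slice header (some start) (some stop))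
  else "unknown"

-- ===== PORT B =====
-- the 'for j, c in enumerate(rest): if c == " " and rest[j+1:j+4] in (...): break; name.append(c)'
-- loop of Source B, transcribed as structural recursion on the remaining suffix (rest[j+1:j+4] is
-- the first three characters after the current one)
def pvScan : List Char → List Char
  | [] => []
  | c :: t =>
    if c = ' ' ∧ (t.take 3 = "OX=".toList ∨ t.take 3 = "GN=".toList ∨
                  t.take 3 = "PE=".toList ∨ t.take 3 = "SV=".toList)
    then [] else c :: pvScan t

def extract_organism_alt (header : String) : String :=
  let i := PySem.Str.find header "OS="
  if i = -1 then "unknown"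
  else
    String.ofList (PySem.Chars.strip (pvScan (PySem.Str.slice header (some (i + 3)) none).toList))

-- ===== PRECONDITION & SPEC =====
def Spec_extract_organism (header : String) (out : String) : Prop := out = extract_organism_alt header
instance (header : String) (out : String) : Decidable (Spec_extract_organism header out) := by unfold Spec_extract_organism; infer_instance

-- ===== CLAIM (what is proved, stated in full; the proofs are below) =====
def Claim_equal_extract_organism : Prop := ∀ (header : String), Dom_extract_organism header → Spec_extract_organism header (extract_organism header)

-- ===== LEMMAS AND PROOFS =====

-- the four markers A searches for
def pvM : List String := [" OX=", " GN=", " PE=", " SV="]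

-- A's running-minimum step, expressed over the suffix 'rest' after OS=
def pvStep (rest : List Char) (e : Int) (m : String) : Int :=
  if PySem.Chars.find rest m.toList ≠ -1 ∧ PySem.Chars.find rest m.toList < e then
    PySem.Chars.find rest m.toList
  else e

-- "some marker of ms starts here"
def pvHit (ms : List String) (t : List Char) : Prop := ∃ m ∈ ms, m.toList <+: t

lemma pvF_bounds (rest : List Char) (ms : List String) :
    ∀ e : Int, 0 ≤ e → 0 ≤ ms.foldl (pvStep rest) e ∧ ms.foldl (pvStep rest) e ≤ e := by
  induction ms with
  | nil => intro e he; simpa using he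
  | cons m ms ih =>
    intro e he
    rw [List.foldl_cons, pvStep]
    split_ifs with h
    · have hq : 0 ≤ PySem.Chars.find rest m.toList := by
        have := PySem.Chars.neg_one_le_find rest m.toList; omega
      have := ih _ hq
      exact ⟨this.1, this.2.trans h.2.le⟩
    · exact ih e he

lemma pv_no_hit_of_find_eq_neg_one {rest : List Char} {m : String}
    (hq : PySem.Chars.find rest m.toList = -1) (j : Nat) : ¬ m.toList <+: rest.drop j := by
  intro hpre
  have hinf : PySem.Chars.isIn m.toList rest = true :=
    (PySem.Chars.exists_prefix_drop_iff_isIn m.toList rest).mp ⟨j, hpre⟩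
  have := (PySem.Chars.find_eq_neg_one_iff rest m.toList).mp hq
  exact this ((PySem.Chars.isIn_iff_infix m.toList rest).mp hinf)

lemma pvF_before (rest : List Char) (ms : List String) :
    ∀ e : Int, 0 ≤ e → ∀ j : Nat, (j : Int) < ms.foldl (pvStep rest) e →
      (j : Int) < e ∧ ∀ m ∈ ms, ¬ m.toList <+: rest.drop j := by
  induction ms with
  | nil => intro e _ j hj; simp only [List.foldl_nil] at hj; exact ⟨hj, by simp⟩
  | cons m ms ih =>
    intro e he j hj
    rw [List.foldl_cons, pvStep] at hj
    split_ifs at hj with h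
    · have hq : 0 ≤ PySem.Chars.find rest m.toList := by
        have := PySem.Chars.neg_one_le_find rest m.toList; omega
      obtain ⟨hje, hms⟩ := ih _ hq j hj
      refine ⟨hje.trans h.2, ?_⟩
      intro m' hm'
      rcases List.mem_cons.mp hm' with rfl | hm'
      · exact (PySem.Chars.find_spec hq).2 j (by omega)
      · exact hms m' hm'
    · obtain ⟨hje, hms⟩ := ih e he j hj
      refine ⟨hje, ?_⟩
      intro m' hm'
      rcases List.mem_cons.mp hm' with rfl | hm'
      · by_cases hq1 : PySem.Chars.find rest m'.toList = -1
        · exact pv_no_hit_of_find_eq_neg_one hq1 j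
        · have hq : 0 ≤ PySem.Chars.find rest m'.toList := by
            have := PySem.Chars.neg_one_le_find rest m'.toList; omega
          have hle : e ≤ PySem.Chars.find rest m'.toList := by
            by_contra hc; exact h ⟨hq1, by omega⟩
          exact (PySem.Chars.find_spec hq).2 j (by omega)
      · exact hms m' hm'

lemma pvF_at (rest : List Char) (ms : List String) :
    ∀ e : Int, 0 ≤ e → ms.foldl (pvStep rest) e = e ∨
      pvHit ms (rest.drop (ms.foldl (pvStep rest) e).toNat) := by
  induction ms with
  | nil => intro e _; left; rfl
  | cons m ms ih =>
    intro e he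
    rw [List.foldl_cons, pvStep]
    split_ifs with h
    · have hq : 0 ≤ PySem.Chars.find rest m.toList := by
        have := PySem.Chars.neg_one_le_find rest m.toList; omega
      rcases ih _ hq with heq | ⟨m', hm', hp⟩
      · right; exact ⟨m, List.mem_cons_self .., by rw [heq]; exact (PySem.Chars.find_spec hq).1⟩
      · right; exact ⟨m', List.mem_cons_of_mem _ hm', hp⟩
    · rcases ih e he with heq | ⟨m', hm', hp⟩
      · left; exact heq
      · right; exact ⟨m', List.mem_cons_of_mem _ hm', hp⟩

-- A's fold over the whole header starting at index k equals k + the fold over the suffix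
lemma pv_shift (header : String) (k : Nat) (hk : k ≤ header.toList.length) (ms : List String) :
    ∀ e : Int, 0 ≤ e →
      ms.foldl
        (fun e' m =>
          let pos := PySem.Str.findFrom header m (k : Int)
          if pos ≠ -1 ∧ pos < e' then pos else e')
        ((k : Int) + e)
      = (k : Int) + ms.foldl (pvStep (header.toList.drop k)) e := by
  induction ms with
  | nil => intro e _; rfl
  | cons m ms ih =>
    intro e he
    rw [List.foldl_cons, List.foldl_cons]
    have hff : PySem.Str.findFrom header m (k : Int) =
        if PySem.Chars.find (header.toList.drop k) m.toList = -1 then -1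
        else (k : Int) + PySem.Chars.find (header.toList.drop k) m.toList := by
      rw [PySem.Str.findFrom_eq]
      exact PySem.Chars.findFrom_natCast header.toList m.toList k hk
    have hgeq := PySem.Chars.neg_one_le_find (header.toList.drop k) m.toList
    have hacc : (let pos := PySem.Str.findFrom header m (k : Int);
        if pos ≠ -1 ∧ pos < (k : Int) + e then pos else (k : Int) + e)
        = (k : Int) + pvStep (header.toList.drop k) e m := by
      rw [hff]
      simp only [pvStep]
      split_ifs <;> omega
    rw [hacc, ih _ (by simp only [pvStep]; split_ifs <;> omega)]

-- pvScan's stop condition is exactly "a marker of pvM starts at this position"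
lemma pv_hit_cons (c : Char) (t : List Char) :
    (c = ' ' ∧ (t.take 3 = "OX=".toList ∨ t.take 3 = "GN=".toList ∨
                t.take 3 = "PE=".toList ∨ t.take 3 = "SV=".toList)) ↔ pvHit pvM (c :: t) := by
  have h1 : (" OX=" : String).toList = ' ' :: "OX=".toList := by decide
  have h2 : (" GN=" : String).toList = ' ' :: "GN=".toList := by decide
  have h3 : (" PE=" : String).toList = ' ' :: "PE=".toList := by decide
  have h4 : (" SV=" : String).toList = ' ' :: "SV=".toList := by decide
  have key : ∀ m3 : List Char, m3.length = 3 → (m3 <+: t ↔ t.take 3 = m3) := by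
    intro m3 hm3; rw [List.prefix_iff_eq_take, hm3]; exact eq_comm
  constructor
  · rintro ⟨rfl, h⟩
    rcases h with h | h | h | h
    · exact ⟨" OX=", by simp [pvM], by rw [h1, List.cons_prefix_cons]; exact ⟨rfl, (key _ (by decide)).mpr h⟩⟩
    · exact ⟨" GN=", by simp [pvM], by rw [h2, List.cons_prefix_cons]; exact ⟨rfl, (key _ (by decide)).mpr h⟩⟩
    · exact ⟨" PE=", by simp [pvM], by rw [h3, List.cons_prefix_cons]; exact ⟨rfl, (key _ (by decide)).mpr h⟩⟩
    · exact ⟨" SV=", by simp [pvM], by rw [h4, List.cons_prefix_cons]; exact ⟨rfl, (key _ (by decide)).mpr h⟩⟩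
  · rintro ⟨m, hm, hp⟩
    simp only [pvM, List.mem_cons, List.not_mem_nil, or_false] at hm
    rcases hm with rfl | rfl | rfl | rfl
    · rw [h1, List.cons_prefix_cons] at hp
      exact ⟨hp.1.symm, Or.inl ((key _ (by decide)).mp hp.2)⟩
    · rw [h2, List.cons_prefix_cons] at hp
      exact ⟨hp.1.symm, Or.inr (Or.inl ((key _ (by decide)).mp hp.2))⟩
    · rw [h3, List.cons_prefix_cons] at hp
      exact ⟨hp.1.symm, Or.inr (Or.inr (Or.inl ((key _ (by decide)).mp hp.2)))⟩
    · rw [h4, List.cons_prefix_cons] at hp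
      exact ⟨hp.1.symm, Or.inr (Or.inr (Or.inr ((key _ (by decide)).mp hp.2)))⟩

-- pvScan stops exactly at the first marker position
lemma pv_scan_take : ∀ (t : List Char) (N : Nat), N ≤ t.length →
    (∀ j, j < N → ¬ pvHit pvM (t.drop j)) → (N = t.length ∨ pvHit pvM (t.drop N)) →
    pvScan t = t.take N := by
  intro t
  induction t with
  | nil =>
    intro N hN _ _
    have : N = 0 := by simpa using hN
    subst this; rfl
  | cons c t ih =>
    intro N hN h1 h2
    cases N with
    | zero =>
      rcases h2 with h2 | h2
      · simp at h2
      · rw [pvScan, if_pos ((pv_hit_cons c t).mpr (by simpa using h2))]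
        rfl
    | succ N =>
      have hnot : ¬ pvHit pvM (c :: t) := by simpa using h1 0 (Nat.succ_pos N)
      rw [pvScan, if_neg (fun hc => hnot ((pv_hit_cons c t).mp hc)), List.take_succ_cons]
      refine congrArg (c :: ·) (ih N (by simpa using hN) ?_ ?_)
      · intro j hj
        simpa using h1 (j + 1) (by omega)
      · rcases h2 with h2 | h2
        · left; simpa using h2
        · right; simpa using h2

-- explicit (let-free) forms of the two ports
lemma pvA_eq (header : String) : extract_organism header =
    if PySem.Str.isIn "OS=" header then
      PySem.Str.strip (PySem.Str.slice header (some (PySem.Str.find header "OS=" + 3))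
        (some ([" OX=", " GN=", " PE=", " SV="].foldl
          (fun e m =>
            let pos := PySem.Str.findFrom header m (PySem.Str.find header "OS=" + 3)
            if pos ≠ -1 ∧ pos < e then pos else e)
          (PySem.Str.len header))))
    else "unknown" := rfl

lemma pvB_eq (header : String) : extract_organism_alt header =
    if PySem.Str.find header "OS=" = -1 then "unknown"
    else String.ofList (PySem.Chars.strip (pvScan
      (PySem.Str.slice header (some (PySem.Str.find header "OS=" + 3)) none).toList)) := rfl

-- ===== VERDICT (by name: the statement is the Claim_ definition above) =====
theorem extract_organism_spec : Claim_equal_extract_organism := by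
  intro header _
  unfold Spec_extract_organism
  rw [pvA_eq, pvB_eq]
  by_cases hocc : ("OS=" : String).toList <:+: header.toList
  · -- OS= present in the header
    have hin : PySem.Str.isIn "OS=" header = true := by
      rw [PySem.Str.isIn_iff_infix]; exact hocc
    have hf0 : 0 ≤ PySem.Str.find header "OS=" := by
      rw [PySem.Str.find_eq]; exact (PySem.Chars.find_nonneg_iff _ _).mpr hocc
    have hfne : ¬ PySem.Str.find header "OS=" = -1 := by omega
    rw [if_pos hin, if_neg hfne]
    obtain ⟨n, hn⟩ : ∃ n : Nat, PySem.Str.find header "OS=" = (n : Int) :=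
      ⟨(PySem.Str.find header "OS=").toNat, (Int.toNat_of_nonneg hf0).symm⟩
    have hfc : PySem.Chars.find header.toList ("OS=" : String).toList = (n : Int) := by
      rw [← PySem.Str.find_eq]; exact hn
    have hspec := PySem.Chars.find_spec (s := header.toList) (sub := ("OS=" : String).toList)
      (by rw [hfc]; exact Int.natCast_nonneg n)
    have hlen3 : n + 3 ≤ header.toList.length := by
      have hpre := hspec.1
      have := hpre.length_le
      rw [hfc] at this
      simp [Int.toNat_natCast] at this
      have h3 : (("OS=" : String).toList).length = 3 := by decide
      have hlc : header.toList.length = header.length := by simp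
      omega
    set rest := header.toList.drop (n + 3) with hrest
    have hstart : PySem.Str.find header "OS=" + 3 = ((n + 3 : Nat) : Int) := by
      rw [hn]; push_cast; ring
    rw [hstart]
    have hlenheader : PySem.Str.len header = ((n + 3 : Nat) : Int) + (rest.length : Int) := by
      rw [PySem.Str.len_eq, hrest, List.length_drop]; push_cast; omega
    rw [hlenheader, pv_shift header (n + 3) hlen3 _ (rest.length : Int) (by positivity)]
    -- name the suffix-level stop index
    set E := [" OX=", " GN=", " PE=", " SV="].foldl (pvStep rest) (rest.length : Int) with hE
    have hbounds := pvF_bounds rest [" OX=", " GN=", " PE=", " SV="] (rest.length : Int) (by positivity)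
    rw [← hE] at hbounds
    have hE0 : 0 ≤ E := hbounds.1
    have hEN : E = ((E.toNat : Nat) : Int) := (Int.toNat_of_nonneg hE0).symm
    -- B's rest is the same suffix
    have hBrest : (PySem.Str.slice header (some ((n + 3 : Nat) : Int)) none).toList = rest := by
      rw [PySem.Str.toList_slice, PySem.Chars.slice_eq_listSlice,
        PySem.List.slice_from_natCast]
    rw [hBrest]
    -- reduce to a List Char equation
    apply String.toList_inj.mp
    rw [PySem.Str.toList_strip, PySem.Str.toList_slice, PySem.Chars.slice_eq_listSlice, hEN,
      PySem.List.slice_natCast_add]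
    have hRlist : (String.ofList (PySem.Chars.strip (pvScan rest))).toList =
        PySem.Chars.strip (pvScan rest) := by simp
    rw [hRlist]
    -- pvScan rest stops exactly at index E
    have hscan : pvScan rest = rest.take ((E.toNat : Int)).toNat := by
      rw [Int.toNat_natCast]
      apply pv_scan_take rest E.toNat (by omega)
      · intro j hj
        have hb := pvF_before rest [" OX=", " GN=", " PE=", " SV="] (rest.length : Int)
          (by positivity) j (by rw [← hE]; omega)
        rintro ⟨m, hm, hp⟩
        exact hb.2 m (by simpa [pvM] using hm) hp
      · rcases pvF_at rest [" OX=", " GN=", " PE=", " SV="] (rest.length : Int) (by positivity)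
          with heq | hhit
        · left; rw [← hE] at heq; omega
        · right; rw [← hE] at hhit; exact hhit
    rw [hscan, Int.toNat_natCast, hrest]
  · -- no OS= in the header
    have hin : PySem.Str.isIn "OS=" header = false := by
      rw [← Bool.not_eq_true, PySem.Str.isIn_iff_infix]; exact hocc
    have hf : PySem.Str.find header "OS=" = -1 := by
      rw [PySem.Str.find_eq]; exact (PySem.Chars.find_eq_neg_one_iff _ _).mpr hocc
    rw [hin, if_pos hf]
    rfl
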